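-- pv_equiv track=rewrite | github.com/MCPVOTS/MCPVOTS | comprehensive_workspace_analyzer.py | _detect_architecture_style
-- ===== SOURCE A (Python) =====
-- from typing import Dict, List, Any, Optional
--
-- def _detect_architecture_style(files: List[str], project_type: str) -> str:
--     """Detect architecture style from project files"""
--     files_lower = [f.lower() for f in files]
--
--     # Check for microservices indicators
--     if any('docker' in f for f in files_lower) and any('service' in f for f in files_lower):
--         return 'microservices'
--
--     # Check for MVC pattern
--     if any('controller' in f for f in files_lower) and any('model' in f for f in files_lower):
--         return 'mvc'
--
--     # Check for component-based (React/Vue)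
--     if any('component' in f for f in files_lower):
--         return 'component-based'
--
--     # Check for layered architecture
--     if any('service' in f for f in files_lower) and any('repository' in f for f in files_lower):
--         return 'layered'
--
--     return 'monolithic'
-- ===== SOURCE B (Python) =====
-- from typing import List
--
-- _KEYWORDS = ('docker', 'service', 'controller', 'model', 'component', 'repository')
--
-- # Rule table: first rule whose required keywords all occur wins.
-- _RULES = [
--     (('docker', 'service'), 'microservices'),
--     (('controller', 'model'), 'mvc'),
--     (('component',), 'component-based'),
--     (('service', 'repository'), 'layered'),
-- ]
--
-- def _detect_architecture_style(files: List[str], project_type: str) -> str: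
--     """Single pass accumulating keyword occurrences, then a table-driven rule lookup."""
--     found = set()
--     for f in files:
--         fl = f.lower()
--         found.update(kw for kw in _KEYWORDS if kw in fl)
--     for required, label in _RULES:
--         if found.issuperset(required):
--             return label
--     return 'monolithic'
-- ===== Notes on version B (the rewrite author's own statement) =====
-- stated objective: alternative
-- what changed: A lowercases the list and runs up to seven separate any()-scans inside a hard-coded if/return cascade; B scans the files once, accumulating the set of keywords that occur, and then replaces the cascade by a data-driven rule table (first rule whose required keyword set is a subset of the found set wins).
import Mathlib
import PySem

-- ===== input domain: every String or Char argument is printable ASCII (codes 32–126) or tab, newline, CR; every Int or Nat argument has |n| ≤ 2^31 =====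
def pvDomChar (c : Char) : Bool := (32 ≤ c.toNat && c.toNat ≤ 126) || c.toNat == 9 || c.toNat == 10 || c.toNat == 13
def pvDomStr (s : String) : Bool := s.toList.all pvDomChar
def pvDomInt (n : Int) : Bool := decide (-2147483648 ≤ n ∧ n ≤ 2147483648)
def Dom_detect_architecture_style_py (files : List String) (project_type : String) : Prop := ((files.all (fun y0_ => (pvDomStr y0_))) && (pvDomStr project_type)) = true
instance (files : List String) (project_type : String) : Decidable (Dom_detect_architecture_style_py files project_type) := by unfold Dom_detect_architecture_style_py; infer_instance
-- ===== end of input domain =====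

-- B replaces A's per-branch any()-scans and hard-coded cascade by one accumulating pass
-- over the files plus a data-driven rule table (objective: alternative).

-- ===== PORT A =====
def detect_architecture_style_py (files : List String) (project_type : String) : String :=
  let files_lower := files.map PySem.Str.lower
  if files_lower.any (fun f => PySem.Str.isIn "docker" f) && files_lower.any (fun f => PySem.Str.isIn "service" f) then
    "microservices"
  else if files_lower.any (fun f => PySem.Str.isIn "controller" f) && files_lower.any (fun f => PySem.Str.isIn "model" f) then
    "mvc"
  else if files_lower.any (fun f => PySem.Str.isIn "component" f) then
    "component-based"
  else if files_lower.any (fun f => PySem.Str.isIn "service" f) && files_lower.any (fun f => PySem.Str.isIn "repository" f) then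
    "layered"
  else
    "monolithic"

-- ===== PORT B =====
def archKeywords : List String := ["docker", "service", "controller", "model", "component", "repository"]

def archRules : List (List String × String) :=
  [(["docker", "service"], "microservices"),
   (["controller", "model"], "mvc"),
   (["component"], "component-based"),
   (["service", "repository"], "layered")]

def firstRule : List (List String × String) → PySem.Set String → String
  | [], _ => "monolithic"
  | (required, label) :: rest, found =>
      if required.all (fun kw => found.contains kw) then label else firstRule rest found

def detect_architecture_style_py_alt (files : List String) (project_type : String) : String :=
  let found : PySem.Set String := files.foldl
    (fun s f =>
      let fl := PySem.Str.lower f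
      archKeywords.foldl (fun s kw => if PySem.Str.isIn kw fl then s.add kw else s) s)
    PySem.Set.empty
  firstRule archRules found

-- ===== PRECONDITION & SPEC =====
def Spec_detect_architecture_style_py (files : List String) (project_type : String) (out : String) : Prop := out = detect_architecture_style_py_alt files project_type
instance (files : List String) (project_type : String) (out : String) : Decidable (Spec_detect_architecture_style_py files project_type out) := by unfold Spec_detect_architecture_style_py; infer_instance

-- ===== CLAIM (what is proved, stated in full; the proofs are below) =====
def Claim_equal_detect_architecture_style_py : Prop := ∀ (files : List String) (project_type : String), Dom_detect_architecture_style_py files project_type → Spec_detect_architecture_style_py files project_type (detect_architecture_style_py files project_type)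

-- ===== LEMMAS AND PROOFS =====

-- membership after the inner keyword fold
lemma inner_mem (kws : List String) (s : PySem.Set String) (fl : String) (kw : String) :
    kw ∈ kws.foldl (fun s k => if PySem.Str.isIn k fl then s.add k else s) s ↔
      kw ∈ s ∨ (kw ∈ kws ∧ PySem.Str.isIn kw fl = true) := by
  induction kws generalizing s with
  | nil => simp
  | cons k ks ih =>
    simp only [List.foldl_cons, ih, List.mem_cons]
    by_cases hin : PySem.Str.isIn k fl = true
    · simp only [hin, if_pos]
      constructor
      · rintro (h | h)
        · rcases (PySem.Set.mem_add _ _ _).1 h with h | rfl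
          · exact Or.inl h
          · exact Or.inr ⟨Or.inl rfl, hin⟩
        · exact Or.inr ⟨Or.inr h.1, h.2⟩
      · rintro (h | ⟨(rfl | h), h2⟩)
        · exact Or.inl ((PySem.Set.mem_add _ _ _).2 (Or.inl h))
        · exact Or.inl ((PySem.Set.mem_add _ _ _).2 (Or.inr rfl))
        · exact Or.inr ⟨h, h2⟩
    · simp only [hin, if_neg, Bool.false_eq_true]
      constructor
      · rintro (h | h)
        · exact Or.inl h
        · exact Or.inr ⟨Or.inr h.1, h.2⟩
      · rintro (h | ⟨(rfl | h), h2⟩)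
        · exact Or.inl h
        · exact absurd h2 hin
        · exact Or.inr ⟨h, h2⟩

-- membership after the whole one-pass fold
lemma outer_mem (files : List String) (s : PySem.Set String) (kw : String) :
    kw ∈ files.foldl
        (fun s f =>
          let fl := PySem.Str.lower f
          archKeywords.foldl (fun s k => if PySem.Str.isIn k fl then s.add k else s) s) s ↔
      kw ∈ s ∨ (kw ∈ archKeywords ∧ files.any (fun f => PySem.Str.isIn kw (PySem.Str.lower f)) = true) := by
  induction files generalizing s with
  | nil => simp
  | cons f fs ih =>
    simp only [List.foldl_cons, ih, inner_mem, List.any_cons, Bool.or_eq_true]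
    tauto

lemma found_contains (files : List String) (kw : String) (h : kw ∈ archKeywords) :
    PySem.Set.contains
      (files.foldl
        (fun s f =>
          let fl := PySem.Str.lower f
          archKeywords.foldl (fun s k => if PySem.Str.isIn k fl then s.add k else s) s)
        PySem.Set.empty) kw
      = files.any (fun f => PySem.Str.isIn kw (PySem.Str.lower f)) := by
  rcases hb : files.any (fun f => PySem.Str.isIn kw (PySem.Str.lower f)) with _ | _
  · rw [Bool.eq_false_iff]
    intro hc
    rcases (outer_mem files PySem.Set.empty kw).1 ((PySem.Set.contains_iff _ _).1 hc) with h2 | ⟨-, h2⟩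
    · simp [PySem.Set.empty] at h2
    · rw [hb] at h2; cases h2
  · exact (PySem.Set.contains_iff _ _).2 ((outer_mem files PySem.Set.empty kw).2 (Or.inr ⟨h, hb⟩))

-- ===== VERDICT (by name: the statement is the Claim_ definition above) =====
theorem detect_architecture_style_py_spec : Claim_equal_detect_architecture_style_py := by
  intro files project_type _
  unfold Spec_detect_architecture_style_py detect_architecture_style_py detect_architecture_style_py_alt
  simp only [List.any_map, Function.comp_def, archRules, firstRule, List.all_cons, List.all_nil,
    Bool.and_true]
  rw [found_contains files "docker" (by simp [archKeywords]),
      found_contains files "service" (by simp [archKeywords]),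
      found_contains files "controller" (by simp [archKeywords]),
      found_contains files "model" (by simp [archKeywords]),
      found_contains files "component" (by simp [archKeywords]),
      found_contains files "repository" (by simp [archKeywords])]
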